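-- pv_equiv track=rewrite | github.com/spirosparaskevas/squad | squad/dataloading.py | _select_answer
-- ===== SOURCE A (Python) =====
-- from collections import Counter
--
-- def _select_answer(answers):
--     answers_text = [a["text"] for a in answers]
--     answers_freq = Counter(answers_text)
--     answers_meta = [(a, answers_freq[a], len(a)) for a in answers_text]
--     max_freq = max(c[1] for c in answers_meta)
--     chosen_answer_text = min([c for c in answers_meta if c[1] == max_freq], key=lambda c: c[2])[0]
--     chosen_answer = None
--     for a in answers:
--         if a["text"] == chosen_answer_text:
--             chosen_answer = a
--             break
--     assert chosen_answer is not None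
--     return chosen_answer
-- ===== SOURCE B (Python) =====
-- from collections import Counter
--
-- def _select_answer(answers):
--     freq = Counter(a["text"] for a in answers)
--     return min(answers, key=lambda a: (-freq[a["text"]], len(a["text"])))
-- ===== Notes on version B (the rewrite author's own statement) =====
-- stated objective: simpler
-- what changed: Replaces A's four-stage chain (meta triple list, max of frequencies, filter to max-frequency entries, min by length, then a recovery scan for the matching answer) with one stable min over the answers themselves under the lexicographic key (-frequency, length), which returns the chosen answer object directly.
import Mathlib
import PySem

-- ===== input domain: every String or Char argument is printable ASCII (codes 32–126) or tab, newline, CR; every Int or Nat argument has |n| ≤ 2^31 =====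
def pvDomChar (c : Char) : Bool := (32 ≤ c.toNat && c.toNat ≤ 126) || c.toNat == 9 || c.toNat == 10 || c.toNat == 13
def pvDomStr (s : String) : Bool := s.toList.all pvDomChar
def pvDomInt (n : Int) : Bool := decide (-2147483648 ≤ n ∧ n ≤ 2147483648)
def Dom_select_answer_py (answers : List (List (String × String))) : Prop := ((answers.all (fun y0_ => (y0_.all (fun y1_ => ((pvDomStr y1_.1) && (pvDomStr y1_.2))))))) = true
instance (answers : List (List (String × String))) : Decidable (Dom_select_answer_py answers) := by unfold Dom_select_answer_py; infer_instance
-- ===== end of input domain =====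

-- B replaces A's meta-list/max/filter/min/recovery-scan chain by one stable min with the
-- lexicographic key (-frequency, length); same result, simpler decomposition (no speed claim).

-- ===== PORT A =====
-- a["text"]: first-match association-list lookup; the KeyError case (key absent) is excluded by Pre_
def pyText (a : List (String × String)) : String := (List.lookup "text" a).getD ""

def select_answer_py (answers : List (List (String × String))) : List (String × String) :=
  let answers_text := answers.map pyText
  let answers_freq := PySem.Dict.counter answers_text
  let answers_meta := answers_text.map (fun s => (s, answers_freq.getD s 0, PySem.Str.len s))
  let max_freq := (PySem.List.max? (answers_meta.map (fun c => c.2.1)) (fun v => v)).getD 0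
  let chosen_answer_text :=
    ((PySem.List.min? (answers_meta.filter (fun c => c.2.1 == max_freq)) (fun c => c.2.2)).getD ("", 0, 0)).1
  -- for-loop with break: first answer whose text equals chosen_answer_text (exists by the assert)
  (answers.find? (fun a => pyText a == chosen_answer_text)).getD []

-- ===== PORT B =====
def select_answer_py_alt (answers : List (List (String × String))) : List (String × String) :=
  let freq := PySem.Dict.counter (answers.map pyText)
  (PySem.List.min2? answers
      (fun a => -(freq.getD (pyText a) 0))
      (fun a => PySem.Str.len (pyText a))).getD []

-- ===== PRECONDITION & SPEC =====
-- Pre_ excludes exactly the inputs where the Python A raises: the empty list (max() of an empty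
-- sequence, ValueError) and answers lacking the key "text" (KeyError); B raises there too.
def Pre_select_answer_py (answers : List (List (String × String))) : Prop :=
  answers ≠ [] ∧ ∀ a ∈ answers, (List.lookup "text" a).isSome = true
instance (answers : List (List (String × String))) : Decidable (Pre_select_answer_py answers) := by unfold Pre_select_answer_py; infer_instance

def pvWitness_select_answer_py : (List (List (String × String))) := [[("text", "a")]]

def Spec_select_answer_py (answers : List (List (String × String))) (out : List (String × String)) : Prop := out = select_answer_py_alt answers
instance (answers : List (List (String × String))) (out : List (String × String)) : Decidable (Spec_select_answer_py answers out) := by unfold Spec_select_answer_py; infer_instance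

-- ===== CLAIM (what is proved, stated in full; the proofs are below) =====
def Claim_equal_select_answer_py : Prop := ∀ (answers : List (List (String × String))), Dom_select_answer_py answers → Pre_select_answer_py answers → Spec_select_answer_py answers (select_answer_py answers)

-- ===== LEMMAS AND PROOFS =====

-- frequency of a's text among all texts of `answers` (what the counter lookup computes)
def pvG (answers : List (List (String × String))) (a : List (String × String)) : Int :=
  ((answers.map pyText).count (pyText a) : Int)

def pvL (a : List (String × String)) : Int := PySem.Str.len (pyText a)

-- B's lexicographic key
def pvKey (answers : List (List (String × String))) (a : List (String × String)) : Lex (Int × Int) :=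
  toLex (-(pvG answers a), pvL a)

-- A's meta triple
def pvTrip (answers : List (List (String × String))) (a : List (String × String)) :
    String × Int × Int := (pyText a, pvG answers a, pvL a)

-- reference "first argmin from the left" recursion shared by the min?/min2? characterisations
def pvFMin {α κ : Type} [LinearOrder κ] (K : α → κ) : α → List α → α
  | m, [] => m
  | m, x :: t => if K x < K m then pvFMin K x t else pvFMin K m t

theorem pvFMin_le {α κ : Type} [LinearOrder κ] (K : α → κ) :
    ∀ (t : List α) (m : α), ∀ y ∈ m :: t, K (pvFMin K m t) ≤ K y := by
  intro t
  induction t with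
  | nil => intro m y hy; simp at hy; subst hy; simp [pvFMin]
  | cons x t ih =>
    intro m y hy
    simp only [pvFMin]
    rcases List.mem_cons.mp hy with h1 | hy'
    · subst h1
      split
      · exact le_trans (ih x x (List.mem_cons_self)) (le_of_lt (by assumption))
      · exact ih y y (List.mem_cons_self)
    · rcases List.mem_cons.mp hy' with h2 | h3
      · subst h2
        split
        · exact ih y y (List.mem_cons_self)
        · exact le_trans (ih m m (List.mem_cons_self)) (not_lt.mp (by assumption))
      · split
        · exact ih x y (List.mem_cons_of_mem _ h3)
        · exact ih m y (List.mem_cons_of_mem _ h3)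

theorem pvFMin_decomp {α κ : Type} [LinearOrder κ] (K : α → κ) :
    ∀ (t : List α) (m : α), ∃ p s, m :: t = p ++ (pvFMin K m t) :: s ∧
      ∀ y ∈ p, K (pvFMin K m t) < K y := by
  intro t
  induction t with
  | nil => intro m; exact ⟨[], [], rfl, by simp⟩
  | cons x t ih =>
    intro m
    simp only [pvFMin]
    split
    · rename_i hlt
      obtain ⟨p, s, hps, hstrict⟩ := ih x
      refine ⟨m :: p, s, by rw [List.cons_append, ← hps], ?_⟩
      intro y hy
      rcases List.mem_cons.mp hy with h1 | h2
      · subst h1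
        exact lt_of_le_of_lt (pvFMin_le K t x x List.mem_cons_self) hlt
      · exact hstrict y h2
    · rename_i hnlt
      obtain ⟨p, s, hps, hstrict⟩ := ih m
      cases p with
      | nil =>
        simp only [List.nil_append] at hps
        obtain ⟨hm, ht⟩ := List.cons_eq_cons.mp hps
        refine ⟨[], x :: s, ?_, by simp⟩
        rw [List.nil_append, ← hm, ← ht]
      | cons p0 p' =>
        rw [List.cons_append] at hps
        obtain ⟨hp0, htail⟩ := List.cons_eq_cons.mp hps
        refine ⟨m :: x :: p', s, ?_, ?_⟩
        · rw [List.cons_append, List.cons_append, ← htail]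
        · intro y hy
          rcases List.mem_cons.mp hy with h1 | h2
          · subst h1
            apply hstrict
            rw [hp0]; exact List.mem_cons_self
          · rcases List.mem_cons.mp h2 with h3 | h4
            · subst h3
              have hm : K (pvFMin K m t) < K m := by
                apply hstrict
                rw [hp0]; exact List.mem_cons_self
              exact lt_of_lt_of_le hm (not_lt.mp hnlt)
            · exact hstrict y (List.mem_cons_of_mem _ h4)

theorem pvFMin_mem {α κ : Type} [LinearOrder κ] (K : α → κ) (t : List α) (m : α) :
    pvFMin K m t ∈ m :: t := by
  obtain ⟨p, s, hps, -⟩ := pvFMin_decomp K t m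
  rw [hps]; simp

-- min? (x :: t) key is the first argmin from the left
theorem pv_min?_foldl {α κ : Type} [LinearOrder κ] (key : α → κ) :
    ∀ (t : List α) (m : α),
      t.foldl (fun acc x => match acc with
        | none => some x
        | some m' => if key x < key m' then some x else some m') (some m)
      = some (pvFMin key m t) := by
  intro t
  induction t with
  | nil => intro m; rfl
  | cons x t ih =>
    intro m
    simp only [List.foldl, pvFMin]
    split
    · exact ih x
    · exact ih m

theorem pv_min?_cons {α κ : Type} [LinearOrder κ] (key : α → κ) (x : α) (t : List α) :
    PySem.List.min? (x :: t) key = some (pvFMin key x t) := by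
  show List.foldl _ none (x :: t) = _
  rw [List.foldl_cons]
  exact pv_min?_foldl key t x

-- the boolean comparison inside min2? is the lexicographic strict order on (k1, k2)
theorem pv_lexcond {α : Type} (k1 k2 : α → Int) (x m : α) :
    (decide (k1 x < k1 m) || !decide (k1 m < k1 x) && decide (k2 x < k2 m))
      = decide (toLex (k1 x, k2 x) < toLex (k1 m, k2 m)) := by
  by_cases h1 : k1 x < k1 m <;> by_cases h2 : k1 m < k1 x <;> by_cases h3 : k2 x < k2 m <;>
    simp [Prod.Lex.toLex_lt_toLex, h1, h2, h3] <;> omega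

theorem pv_min2?_foldl {α : Type} (k1 k2 : α → Int) :
    ∀ (t : List α) (m : α),
      t.foldl (fun acc x => match acc with
        | none => some x
        | some m' => if (decide (k1 x < k1 m') || !decide (k1 m' < k1 x) && decide (k2 x < k2 m')) = true
                     then some x else some m') (some m)
      = some (pvFMin (fun a => toLex (k1 a, k2 a)) m t) := by
  intro t
  induction t with
  | nil => intro m; rfl
  | cons x t ih =>
    intro m
    rw [List.foldl_cons]
    show List.foldl _
        (if (decide (k1 x < k1 m) || !decide (k1 m < k1 x) && decide (k2 x < k2 m)) = true
         then some x else some m) t = _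
    rw [pv_lexcond k1 k2 x m]
    simp only [pvFMin]
    by_cases h : toLex (k1 x, k2 x) < toLex (k1 m, k2 m)
    · simp only [h, decide_true, if_true]
      exact ih x
    · simp only [h, decide_false, Bool.false_eq_true, if_false]
      exact ih m

theorem pv_min2?_cons {α : Type} (k1 k2 : α → Int) (x : α) (t : List α) :
    PySem.List.min2? (x :: t) k1 k2 = some (pvFMin (fun a => toLex (k1 a, k2 a)) x t) := by
  show List.foldl _ none (x :: t) = _
  rw [List.foldl_cons]
  exact pv_min2?_foldl k1 k2 t x

-- pvFMin commutes with map when the key factors through the mapped function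
theorem pvFMin_map {α β κ : Type} [LinearOrder κ] (f : α → β) (key : β → κ) :
    ∀ (t : List α) (m : α),
      pvFMin key (f m) (t.map f) = f (pvFMin (fun a => key (f a)) m t) := by
  intro t
  induction t with
  | nil => intro m; rfl
  | cons x t ih =>
    intro m
    simp only [List.map, pvFMin]
    split
    · exact ih x
    · exact ih m

-- uniqueness of the first global argmin: two decompositions with strictly larger keys before agree
theorem pv_firstmin_lt_aux {α κ : Type} [LinearOrder κ] (K : α → κ) (l : List α)
    (z1 z2 : α) (p1 s1 p2 s2 : List α)
    (h1 : l = p1 ++ z1 :: s1) (h2 : l = p2 ++ z2 :: s2)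
    (hlt : p1.length < p2.length)
    (m1 : ∀ y ∈ l, K z1 ≤ K y) (f2 : ∀ y ∈ p2, K z2 < K y) : False := by
  have hp2 : l.take p2.length = p2 := by rw [h2, List.take_left]
  have hlen : p1.length < l.length := by
    rw [h1, List.length_append, List.length_cons]; omega
  have hz1 : l[p1.length]'hlen = z1 := by
    subst h1
    rw [List.getElem_append_right (le_refl _)]
    simp
  have hlen2 : p1.length < (l.take p2.length).length := by rw [hp2]; exact hlt
  have htk : (l.take p2.length)[p1.length]'hlen2 = z1 := by
    rw [List.getElem_take]; exact hz1
  have hmem : z1 ∈ p2 := by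
    rw [← hp2]
    exact htk ▸ List.getElem_mem hlen2
  have hz2l : z2 ∈ l := by rw [h2]; simp
  exact absurd (m1 z2 hz2l) (not_le.mpr (f2 z1 hmem))

theorem pv_firstmin_unique {α κ : Type} [LinearOrder κ] (K : α → κ) (l : List α)
    (z1 z2 : α) (p1 s1 p2 s2 : List α)
    (h1 : l = p1 ++ z1 :: s1) (h2 : l = p2 ++ z2 :: s2)
    (m1 : ∀ y ∈ l, K z1 ≤ K y) (m2 : ∀ y ∈ l, K z2 ≤ K y)
    (f1 : ∀ y ∈ p1, K z1 < K y) (f2 : ∀ y ∈ p2, K z2 < K y) : z1 = z2 := by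
  rcases Nat.lt_trichotomy p1.length p2.length with hlt | heq | hgt
  · exact absurd (pv_firstmin_lt_aux K l z1 z2 p1 s1 p2 s2 h1 h2 hlt m1 f2) id
  · have h := h1.symm.trans h2
    obtain ⟨-, h'⟩ := List.append_inj h heq
    exact (List.cons_eq_cons.mp h').1
  · exact absurd (pv_firstmin_lt_aux K l z2 z1 p2 s2 p1 s1 h2 h1 hgt m2 f1) id

-- ===== VERDICT (by name: the statement is the Claim_ definition above) =====
theorem select_answer_py_spec : Claim_equal_select_answer_py := by
  intro answers hdom hpre
  unfold Spec_select_answer_py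
  obtain ⟨hne, -⟩ := hpre
  cases answers with
  | nil => exact absurd rfl hne
  | cons x t =>
    clear hdom hne
    -- B returns the first lexicographic argmin of (-frequency, length)
    have hB : select_answer_py_alt (x :: t) = pvFMin (pvKey (x :: t)) x t := by
      simp only [select_answer_py_alt, PySem.Dict.getD_counter]
      rw [pv_min2?_cons]
      rfl
    rw [hB]
    -- canonicalise A's meta list
    have hmeta : ((x :: t).map pyText).map
        (fun s => (s, (PySem.Dict.counter ((x :: t).map pyText)).getD s 0, PySem.Str.len s))
        = (x :: t).map (pvTrip (x :: t)) := by
      rw [List.map_map]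
      refine List.map_congr_left ?_
      intro a ha
      simp [Function.comp, pvTrip, pvG, pvL, PySem.Dict.getD_counter]
    simp only [select_answer_py]
    rw [hmeta]
    have hgm : ((x :: t).map (pvTrip (x :: t))).map (fun c => c.2.1)
        = (x :: t).map (pvG (x :: t)) := by
      rw [List.map_map]
      exact List.map_congr_left (fun a _ => rfl)
    rw [hgm]
    cases hmx : PySem.List.max? ((x :: t).map (pvG (x :: t))) (fun v => v) with
    | none =>
      rw [PySem.List.max?_eq_none_iff] at hmx
      simp at hmx
    | some M =>
      simp only [Option.getD_some]
      -- facts about B's argmin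
      have hbmem : pvFMin (pvKey (x :: t)) x t ∈ x :: t := pvFMin_mem _ t x
      obtain ⟨p, s, hps, hstrict⟩ := pvFMin_decomp (pvKey (x :: t)) t x
      have hble : ∀ y ∈ x :: t,
          pvKey (x :: t) (pvFMin (pvKey (x :: t)) x t) ≤ pvKey (x :: t) y :=
        pvFMin_le (pvKey (x :: t)) t x
      have hgb : ∀ y ∈ x :: t,
          pvG (x :: t) y ≤ pvG (x :: t) (pvFMin (pvKey (x :: t)) x t) := by
        intro y hy
        have h := hble y hy
        simp [pvKey, Prod.Lex.toLex_le_toLex] at h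
        rcases h with h1 | ⟨h1, h2⟩ <;> omega
      have hMub := PySem.List.max?_isMax hmx
      have hMmem := PySem.List.max?_mem hmx
      have hMval : M = pvG (x :: t) (pvFMin (pvKey (x :: t)) x t) := by
        apply le_antisymm
        · obtain ⟨a0, ha0, hA0⟩ := List.mem_map.mp hMmem
          rw [← hA0]
          exact hgb a0 ha0
        · exact hMub _ (List.mem_map.mpr ⟨_, hbmem, rfl⟩)
      have hfil : ((x :: t).map (pvTrip (x :: t))).filter (fun c => c.2.1 == M)
          = ((x :: t).filter (fun a => pvG (x :: t) a == M)).map (pvTrip (x :: t)) := by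
        rw [List.filter_map]
        rfl
      rw [hfil]
      have hqb : (pvG (x :: t) (pvFMin (pvKey (x :: t)) x t) == M) = true := by
        rw [beq_iff_eq]; exact hMval.symm
      have hbLf : pvFMin (pvKey (x :: t)) x t ∈
          (x :: t).filter (fun a => pvG (x :: t) a == M) :=
        List.mem_filter.mpr ⟨hbmem, hqb⟩
      have hLf : (x :: t).filter (fun a => pvG (x :: t) a == M)
          = p.filter (fun a => pvG (x :: t) a == M)
            ++ (pvFMin (pvKey (x :: t)) x t) :: s.filter (fun a => pvG (x :: t) a == M) := by
        have h0 := congrArg (List.filter (fun a => pvG (x :: t) a == M)) hps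
        rw [h0, List.filter_append]
        simp [hqb]
      cases hLfc : (x :: t).filter (fun a => pvG (x :: t) a == M) with
      | nil =>
        rw [hLfc] at hbLf
        exact absurd hbLf (by simp)
      | cons f0 lf' =>
        rw [hLfc] at hLf
        have hchosen : ((PySem.List.min? ((f0 :: lf').map (pvTrip (x :: t)))
            (fun c => c.2.2)).getD ("", 0, 0)).1 = pyText (pvFMin pvL f0 lf') := by
          rw [List.map_cons, pv_min?_cons, Option.getD_some, pvFMin_map]
          rfl
        rw [hchosen]
        -- A's chosen answer is B's argmin, by uniqueness of the first argmin
        obtain ⟨p1, s1, hps1, hstrict1⟩ := pvFMin_decomp pvL lf' f0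
        have hm1 : ∀ y ∈ f0 :: lf', pvL (pvFMin pvL f0 lf') ≤ pvL y :=
          pvFMin_le pvL lf' f0
        have hmemLf : ∀ y ∈ f0 :: lf', y ∈ (x :: t) ∧ pvG (x :: t) y = M := by
          intro y hy
          rw [← hLfc] at hy
          have h := List.mem_filter.mp hy
          exact ⟨h.1, beq_iff_eq.mp h.2⟩
        have hm2 : ∀ y ∈ f0 :: lf', pvL (pvFMin (pvKey (x :: t)) x t) ≤ pvL y := by
          intro y hy
          obtain ⟨hyA, hgy⟩ := hmemLf y hy
          have h := hble y hyA
          simp [pvKey, Prod.Lex.toLex_le_toLex] at h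
          rcases h with h1 | ⟨h1, h2⟩
          · rw [hgy, hMval] at h1
            omega
          · exact h2
        have hf2 : ∀ y ∈ p.filter (fun a => pvG (x :: t) a == M),
            pvL (pvFMin (pvKey (x :: t)) x t) < pvL y := by
          intro y hy
          have hyp := (List.mem_filter.mp hy).1
          have hgy := beq_iff_eq.mp (List.mem_filter.mp hy).2
          have h := hstrict y hyp
          simp [pvKey, Prod.Lex.toLex_lt_toLex] at h
          rcases h with h1 | ⟨h1, h2⟩
          · rw [hgy, hMval] at h1
            omega
          · exact h2
        have haz : pvFMin pvL f0 lf' = pvFMin (pvKey (x :: t)) x t :=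
          pv_firstmin_unique pvL (f0 :: lf') _ _ p1 s1 _ _ hps1 hLf hm1 hm2 hstrict1 hf2
        rw [haz]
        -- the recovery scan finds exactly B's argmin
        have hfind : (x :: t).find?
            (fun a => pyText a == pyText (pvFMin (pvKey (x :: t)) x t))
            = some (pvFMin (pvKey (x :: t)) x t) := by
          have hcg := congrArg
            (List.find? (fun a => pyText a == pyText (pvFMin (pvKey (x :: t)) x t))) hps
          rw [hcg, List.find?_append]
          have hnone : p.find?
              (fun a => pyText a == pyText (pvFMin (pvKey (x :: t)) x t)) = none := by
            rw [List.find?_eq_none]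
            intro y hy hEq
            have hEq' : pyText y = pyText (pvFMin (pvKey (x :: t)) x t) := by
              simpa using hEq
            have h := hstrict y hy
            have hg : pvG (x :: t) y = pvG (x :: t) (pvFMin (pvKey (x :: t)) x t) := by
              simp [pvG, hEq']
            have hl : pvL y = pvL (pvFMin (pvKey (x :: t)) x t) := by
              simp [pvL, hEq']
            simp [pvKey, hg, hl] at h
          rw [hnone, Option.none_or]
          rw [List.find?_cons_of_pos
            (p := fun a => pyText a == pyText (pvFMin (pvKey (x :: t)) x t)) (by simp)]
        rw [hfind]
        rfl
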